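-- pv_equiv track=rewrite | github.com/Michael-F-Ellis/fqs | fix_fqs_chords.py | process_music_line
-- ===== SOURCE A (Python) =====
-- def process_music_line(line):
--     state = 0  # 0=normal, 1=in_chord
--     in_prefix = True  # True while collecting leading octave marks
--     result = []
--
--     for c in line:
--         if state == 0:
--             # Normal state - copy everything
--             result.append(c)
--             if c == '(':
--                 state = 1
--                 in_prefix = True
--         else:  # state == 1
--             if in_prefix:
--                 # Keep leading octave marks until we hit a pitch
--                 result.append(c)
--                 if c.isalpha():
--                     in_prefix = False
--             else:
--                 # Skip octave marks after first pitch until chord ends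
--                 if c == ')':
--                     state = 0
--                     result.append(c)
--                 elif c not in '^/':
--                     result.append(c)
--
--     return ''.join(result)
-- ===== SOURCE B (Python) =====
-- def process_music_line(line):
--     out = []
--     i = 0
--     n = len(line)
--     while i < n:
--         c = line[i]
--         out.append(c)
--         i += 1
--         if c == '(':
--             # chord prefix: copy up to and including the first pitch letter
--             j = i
--             while j < n and not line[j].isalpha():
--                 j += 1
--             if j == n:
--                 out.append(line[i:])
--                 i = n
--             else:
--                 out.append(line[i:j + 1])
--                 i = j + 1
--                 # after the first pitch: drop octave marks until the chord closes
--                 k = line.find(')', i)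
--                 if k == -1:
--                     k = n
--                 out.append(line[i:k].replace('^', '').replace('/', ''))
--                 i = k
--     return ''.join(out)
-- ===== Notes on version B (the rewrite author's own statement) =====
-- stated objective: alternative
-- what changed: Replaced A's two-flag per-character state machine with a segment scan of similar size and cost: copy until '(', copy the chord prefix through the first pitch letter, then filter '^'/'/' out of the span up to the closing ')' and resume there.
import Mathlib
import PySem

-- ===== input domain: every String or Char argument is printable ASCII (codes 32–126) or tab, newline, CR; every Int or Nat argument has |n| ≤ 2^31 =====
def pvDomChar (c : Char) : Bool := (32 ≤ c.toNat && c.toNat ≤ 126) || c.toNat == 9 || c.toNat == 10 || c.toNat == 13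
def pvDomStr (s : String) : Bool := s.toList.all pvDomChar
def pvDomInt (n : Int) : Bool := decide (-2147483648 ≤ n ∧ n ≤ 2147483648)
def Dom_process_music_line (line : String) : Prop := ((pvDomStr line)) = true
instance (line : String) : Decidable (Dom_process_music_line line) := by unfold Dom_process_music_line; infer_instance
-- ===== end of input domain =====

-- B replaces A's two-flag per-character state machine by a segment-then-filter
-- decomposition (copy to '(', copy the prefix through the first pitch letter,
-- filter '^'/'/' up to the closing ')'); objective: alternative decomposition, same return value.

-- ===== PORT A =====
-- literal transliteration of A's for-loop FSM: state (0 = normal, 1 = in chord)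
-- and in_prefix flag threaded through the character loop, result accumulated.
def pvAAux : List Char → Nat → Bool → List Char
  | [], _, _ => []
  | c :: rest, state, inPrefix =>
    if state = 0 then
      if c = '(' then c :: pvAAux rest 1 true
      else c :: pvAAux rest 0 inPrefix
    else
      if inPrefix then
        if PySem.Chars.isalpha c then c :: pvAAux rest 1 false
        else c :: pvAAux rest 1 true
      else
        if c = ')' then c :: pvAAux rest 0 inPrefix
        else if c = '^' ∨ c = '/' then pvAAux rest 1 inPrefix
        else c :: pvAAux rest 1 inPrefix

def process_music_line (line : String) : String :=
  String.mk (pvAAux line.toList 0 true)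

-- ===== PORT B =====
-- Source B's segment scan: copy until '(', then take the prefix segment up to and
-- including the first pitch letter (all of the rest if there is none), then the
-- suppression segment up to the first ')' with '^'/'/' filtered out, and resume
-- the normal scan at that ')'.
def pvBGo : List Char → List Char
  | [] => []
  | c :: rest =>
    if c = '(' then
      let pre := rest.takeWhile (fun x => ¬ PySem.Chars.isalpha x)
      match h : rest.dropWhile (fun x => ¬ PySem.Chars.isalpha x) with
      | [] => c :: rest
      | p :: tl =>
        let body := tl.takeWhile (fun x => x ≠ ')')
        c :: pre ++ p :: body.filter (fun x => x ≠ '^' ∧ x ≠ '/')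
          ++ pvBGo (tl.dropWhile (fun x => x ≠ ')'))
    else c :: pvBGo rest
termination_by l => l.length
decreasing_by
  · have h1 := List.length_dropWhile_le (fun x => decide ¬ PySem.Chars.isalpha x = true) rest
    rw [h] at h1
    have h2 : (List.dropWhile (fun x => decide (x ≠ ')')) tl).length ≤ tl.length :=
      List.length_dropWhile_le _ _
    simp only [List.length_cons] at h1 ⊢
    omega
  · simp

def process_music_line_alt (line : String) : String :=
  String.mk (pvBGo line.toList)

-- ===== PRECONDITION & SPEC =====
def Spec_process_music_line (line : String) (out : String) : Prop := out = process_music_line_alt line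
instance (line : String) (out : String) : Decidable (Spec_process_music_line line out) := by unfold Spec_process_music_line; infer_instance

-- ===== CLAIM (what is proved, stated in full; the proofs are below) =====
def Claim_equal_process_music_line : Prop := ∀ (line : String), Dom_process_music_line line → Spec_process_music_line line (process_music_line line)

-- ===== LEMMAS AND PROOFS =====

-- In suppression mode (state 1, in_prefix false) A keeps non-'^'/'/' characters
-- up to the first ')' and then returns to the normal state at that ')'.
theorem pvAAux_supp (tl : List Char) :
    pvAAux tl 1 false =
      (tl.takeWhile (fun x => x ≠ ')')).filter (fun x => x ≠ '^' ∧ x ≠ '/')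
        ++ (match tl.dropWhile (fun x => x ≠ ')') with
            | [] => []
            | d :: tl' => d :: pvAAux tl' 0 false) := by
  induction tl with
  | nil => simp [pvAAux]
  | cons c r ih =>
    by_cases hc : c = ')'
    · subst hc; simp [pvAAux, List.takeWhile, List.dropWhile]
    · by_cases hm : c = '^' ∨ c = '/'
      · rcases hm with hm | hm <;> subst hm <;>
          simp [pvAAux, List.takeWhile, List.dropWhile, ih]
      · push_neg at hm
        simp [pvAAux, hc, hm.1, hm.2, List.takeWhile, List.dropWhile, ih]

theorem pvAAux_supp_nil (tl : List Char)
    (hd : tl.dropWhile (fun x => x ≠ ')') = []) :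
    pvAAux tl 1 false =
      (tl.takeWhile (fun x => x ≠ ')')).filter (fun x => x ≠ '^' ∧ x ≠ '/') := by
  rw [pvAAux_supp, hd]; simp

theorem pvAAux_supp_cons (tl : List Char) (d : Char) (tl' : List Char)
    (hd : tl.dropWhile (fun x => x ≠ ')') = d :: tl') :
    pvAAux tl 1 false =
      (tl.takeWhile (fun x => x ≠ ')')).filter (fun x => x ≠ '^' ∧ x ≠ '/')
        ++ d :: pvAAux tl' 0 false := by
  rw [pvAAux_supp, hd]

-- In prefix mode (state 1, in_prefix true) A copies everything up to and
-- including the first alphabetic character, then switches to suppression mode.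
theorem pvAAux_pref (rest : List Char) :
    pvAAux rest 1 true =
      rest.takeWhile (fun x => ¬ PySem.Chars.isalpha x)
        ++ (match rest.dropWhile (fun x => ¬ PySem.Chars.isalpha x) with
            | [] => []
            | p :: tl => p :: pvAAux tl 1 false) := by
  induction rest with
  | nil => simp [pvAAux]
  | cons c r ih =>
    by_cases ha : PySem.Chars.isalpha c
    · simp [pvAAux, ha, List.takeWhile, List.dropWhile]
    · simp [pvAAux, ha, List.takeWhile, List.dropWhile, ih]

theorem pvAAux_pref_nil (rest : List Char)
    (hd : rest.dropWhile (fun x => ¬ PySem.Chars.isalpha x) = []) :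
    pvAAux rest 1 true = rest := by
  rw [pvAAux_pref, hd]
  simp only [List.append_nil]
  simp only [List.takeWhile_eq_self_iff]
  intro x hx
  simpa using List.dropWhile_eq_nil_iff.mp hd x hx

theorem pvAAux_pref_cons (rest : List Char) (p : Char) (tl : List Char)
    (hd : rest.dropWhile (fun x => ¬ PySem.Chars.isalpha x) = p :: tl) :
    pvAAux rest 1 true =
      rest.takeWhile (fun x => ¬ PySem.Chars.isalpha x) ++ p :: pvAAux tl 1 false := by
  rw [pvAAux_pref, hd]

theorem pvBGo_cons_ne (c : Char) (rest : List Char) (hc : c ≠ '(') :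
    pvBGo (c :: rest) = c :: pvBGo rest := by
  rw [pvBGo, if_neg hc]

theorem pvBGo_paren_nil (rest : List Char)
    (hd : rest.dropWhile (fun x => ¬ PySem.Chars.isalpha x) = []) :
    pvBGo ('(' :: rest) = '(' :: rest := by
  rw [pvBGo, if_pos rfl]
  split
  · rfl
  · rename_i p tl heq
    rw [hd] at heq; cases heq

theorem pvBGo_paren_cons (rest : List Char) (p : Char) (tl : List Char)
    (hd : rest.dropWhile (fun x => ¬ PySem.Chars.isalpha x) = p :: tl) :
    pvBGo ('(' :: rest) =
      '(' :: rest.takeWhile (fun x => ¬ PySem.Chars.isalpha x)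
        ++ p :: (tl.takeWhile (fun x => x ≠ ')')).filter (fun x => x ≠ '^' ∧ x ≠ '/')
        ++ pvBGo (tl.dropWhile (fun x => x ≠ ')')) := by
  rw [pvBGo, if_pos rfl]
  split
  · rename_i heq; rw [hd] at heq; cases heq
  · rename_i p' tl' heq
    rw [hd] at heq
    injection heq with e1 e2
    subst e1; subst e2
    simp

theorem pvMain : ∀ (n : ℕ) (l : List Char), l.length ≤ n → ∀ b, pvAAux l 0 b = pvBGo l := by
  intro n
  induction n with
  | zero =>
    intro l hl b
    have : l = [] := List.length_eq_zero_iff.mp (Nat.le_zero.mp hl)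
    subst this; simp [pvAAux, pvBGo]
  | succ n ih =>
    intro l hl b
    cases l with
    | nil => simp [pvAAux, pvBGo]
    | cons c rest =>
      simp only [List.length_cons, Nat.add_le_add_iff_right] at hl
      by_cases hc : c = '('
      · subst hc
        rw [show pvAAux ('(' :: rest) 0 b = '(' :: pvAAux rest 1 true from by
          simp [pvAAux]]
        cases hd : rest.dropWhile (fun x => ¬ PySem.Chars.isalpha x) with
        | nil =>
          rw [pvBGo_paren_nil rest hd, pvAAux_pref_nil rest hd]
        | cons p tl =>
          have htl : tl.length ≤ n := by
            have h1 : (rest.dropWhile (fun x => ¬ PySem.Chars.isalpha x)).length ≤ rest.length :=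
              List.length_dropWhile_le _ _
            rw [hd] at h1; simp at h1; omega
          rw [pvBGo_paren_cons rest p tl hd, pvAAux_pref_cons rest p tl hd]
          cases hd2 : tl.dropWhile (fun x => x ≠ ')') with
          | nil =>
            rw [pvAAux_supp_nil tl hd2]
            simp [pvBGo]
          | cons d tl' =>
            have hd' : d = ')' := by
              have := List.head?_dropWhile_not (p := fun x => decide (x ≠ ')')) (l := tl)
              rw [hd2] at this; simpa using this
            subst hd'
            have htl' : tl'.length ≤ n := by
              have h2 : (tl.dropWhile (fun x => x ≠ ')')).length ≤ tl.length :=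
                List.length_dropWhile_le _ _
              rw [hd2] at h2; simp at h2; omega
            rw [pvAAux_supp_cons tl ')' tl' hd2]
            rw [pvBGo_cons_ne ')' tl' (by decide)]
            rw [ih tl' htl' false]
            simp
      · rw [pvBGo_cons_ne c rest hc]
        rw [show pvAAux (c :: rest) 0 b = c :: pvAAux rest 0 b from by
          simp [pvAAux, hc]]
        rw [ih rest hl b]

-- ===== VERDICT (by name: the statement is the Claim_ definition above) =====
theorem process_music_line_spec : Claim_equal_process_music_line := by
  intro line _
  unfold Spec_process_music_line process_music_line process_music_line_alt
  exact congrArg String.mk (pvMain line.toList.length line.toList le_rfl true)
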